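-- pv_equiv track=rewrite | github.com/fcattafesta/hbb | WorkSpace.py | writeUncertainities
-- ===== SOURCE A (Python) =====
-- def writeUncertainities(orderedUncertainties, lenght, position):
--     uncLine = ""
--     for n in range(lenght):
--         if n in position:
--             uncLine += str(orderedUncertainties[n])
--         else:
--             uncLine += "-"
--         uncLine += "\t\t\t"
--
--     return uncLine
-- ===== SOURCE B (Python) =====
-- def writeUncertainities(orderedUncertainties, lenght, position):
--     parts = ["-"] * lenght
--     for p in position:
--         if 0 <= p < lenght:
--             parts[p] = str(orderedUncertainties[p])
--     return "".join(s + "\t\t\t" for s in parts)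
-- ===== Notes on version B (the rewrite author's own statement) =====
-- stated objective: simpler
-- what changed: Instead of scanning every index 0..lenght-1 and testing membership in position (O(lenght*|position|)), B pre-fills a '-' table and scatters the uncertainty values directly at the given positions, then joins the cells; one pass over position instead of a membership scan per index.
import Mathlib
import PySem

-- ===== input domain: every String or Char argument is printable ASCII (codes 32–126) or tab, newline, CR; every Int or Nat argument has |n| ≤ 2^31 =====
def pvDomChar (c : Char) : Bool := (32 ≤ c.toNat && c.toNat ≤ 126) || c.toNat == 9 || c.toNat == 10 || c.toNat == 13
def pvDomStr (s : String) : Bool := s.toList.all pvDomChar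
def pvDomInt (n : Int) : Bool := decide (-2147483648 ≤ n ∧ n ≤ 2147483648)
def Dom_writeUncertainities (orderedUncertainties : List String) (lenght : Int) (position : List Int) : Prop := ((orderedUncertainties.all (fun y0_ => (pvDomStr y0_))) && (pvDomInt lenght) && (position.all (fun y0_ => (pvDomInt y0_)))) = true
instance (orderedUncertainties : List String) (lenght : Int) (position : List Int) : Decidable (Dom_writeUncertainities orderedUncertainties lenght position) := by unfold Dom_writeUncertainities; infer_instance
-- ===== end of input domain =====

-- B replaces A's scan over every index (with a membership test per index) by pre-filling a
-- '-' table and scattering the values at the listed positions, then joining the cells (simpler, one sparse pass).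

-- ===== PORT A =====
def writeUncertainities (orderedUncertainties : List String) (lenght : Int) (position : List Int) : String :=
  (PySem.List.pyRange 0 lenght 1).foldl
    (fun uncLine n =>
      (uncLine ++ (if n ∈ position then PySem.List.pyGetD orderedUncertainties n "" else "-")) ++ "\t\t\t")
    ""

-- ===== PORT B =====
def writeUncertainities_alt (orderedUncertainties : List String) (lenght : Int) (position : List Int) : String :=
  let parts : List String :=
    position.foldl
      (fun parts p =>
        if 0 ≤ p ∧ p < lenght then
          PySem.List.pySetD parts p (PySem.List.pyGetD orderedUncertainties p "")
        else parts)
      (List.replicate lenght.toNat "-")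
  parts.foldl (fun acc s => acc ++ (s ++ "\t\t\t")) ""

-- ===== PRECONDITION & SPEC =====
-- Pre_ excludes exactly the inputs on which Python A raises IndexError: some index n with
-- 0 ≤ n < lenght and n ∈ position but n ≥ len(orderedUncertainties).
def Pre_writeUncertainities (orderedUncertainties : List String) (lenght : Int) (position : List Int) : Prop :=
  ∀ p ∈ position, 0 ≤ p → p < lenght → p < (orderedUncertainties.length : Int)
instance (orderedUncertainties : List String) (lenght : Int) (position : List Int) : Decidable (Pre_writeUncertainities orderedUncertainties lenght position) := by unfold Pre_writeUncertainities; infer_instance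

def pvWitness_writeUncertainities : List String × Int × List Int := (["0.12", "0.3"], 3, [1, -1, 5])

def Spec_writeUncertainities (orderedUncertainties : List String) (lenght : Int) (position : List Int) (out : String) : Prop := out = writeUncertainities_alt orderedUncertainties lenght position
instance (orderedUncertainties : List String) (lenght : Int) (position : List Int) (out : String) : Decidable (Spec_writeUncertainities orderedUncertainties lenght position out) := by unfold Spec_writeUncertainities; infer_instance

-- ===== CLAIM (what is proved, stated in full; the proofs are below) =====
def Claim_equal_writeUncertainities : Prop := ∀ (orderedUncertainties : List String) (lenght : Int) (position : List Int), Dom_writeUncertainities orderedUncertainties lenght position → Pre_writeUncertainities orderedUncertainties lenght position → Spec_writeUncertainities orderedUncertainties lenght position (writeUncertainities orderedUncertainties lenght position)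

-- ===== LEMMAS AND PROOFS =====

-- the cell A produces at index n
def pvCell (orderedUncertainties : List String) (position : List Int) (n : Int) : String :=
  if n ∈ position then PySem.List.pyGetD orderedUncertainties n "" else "-"

-- B's scatter loop
def pvScatter (orderedUncertainties : List String) (lenght : Int) (ps : List Int) (init : List String) : List String :=
  ps.foldl
    (fun parts p =>
      if 0 ≤ p ∧ p < lenght then
        PySem.List.pySetD parts p (PySem.List.pyGetD orderedUncertainties p "")
      else parts)
    init

theorem pvScatter_length (ous : List String) (l : Int) (ps : List Int) (init : List String) :
    (pvScatter ous l ps init).length = init.length := by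
  induction ps generalizing init with
  | nil => rfl
  | cons p ps ih =>
    simp only [pvScatter, List.foldl_cons] at *
    rw [ih]
    split_ifs with h
    · rw [PySem.List.pySetD_of_nonneg _ _ h.1, List.length_set]
    · rfl

theorem pvScatter_getElem (ous : List String) (l : Int) (ps : List Int) (init : List String)
    (i : Nat) (hi : i < init.length) :
    (pvScatter ous l ps init)[i]'(by rw [pvScatter_length]; exact hi) =
      if (i : Int) ∈ ps ∧ (i : Int) < l then PySem.List.pyGetD ous i "" else init[i] := by
  induction ps generalizing init with
  | nil => simp [pvScatter]
  | cons p ps ih =>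
    simp only [pvScatter, List.foldl_cons] at *
    split_ifs with h
    · -- step updates at p (0 ≤ p < l)
      rw [ih _ (by rw [PySem.List.pySetD_of_nonneg _ _ h.1, List.length_set]; exact hi)]
      by_cases hmem : (i : Int) ∈ ps ∧ (i : Int) < l
      · have : (i : Int) ∈ p :: ps ∧ (i : Int) < l := ⟨List.mem_cons_of_mem _ hmem.1, hmem.2⟩
        simp [hmem, this]
      · rw [if_neg hmem]
        simp only [PySem.List.pySetD_of_nonneg _ _ h.1]
        rw [List.getElem_set]
        by_cases hpi : p.toNat = i
        · have hip : (i : Int) = p := by omega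
          rw [if_pos hpi,
              if_pos ⟨by rw [hip]; exact List.mem_cons_self, by omega⟩, hip]
        · rw [if_neg hpi]
          have hcond : ¬ ((i : Int) ∈ p :: ps ∧ (i : Int) < l) := by
            rintro ⟨hm, hl⟩
            rcases List.mem_cons.mp hm with h1 | h1
            · exact hpi (by omega)
            · exact hmem ⟨h1, hl⟩
          rw [if_neg hcond]
    · -- step leaves parts unchanged (p out of [0, l))
      rw [ih _ hi]
      have hcond : ((i : Int) ∈ p :: ps ∧ (i : Int) < l) ↔ ((i : Int) ∈ ps ∧ (i : Int) < l) := by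
        constructor
        · rintro ⟨hm, hl⟩
          rcases List.mem_cons.mp hm with h1 | h1
          · exact absurd ⟨by omega, by omega⟩ h
          · exact ⟨h1, hl⟩
        · rintro ⟨hm, hl⟩; exact ⟨List.mem_cons_of_mem _ hm, hl⟩
      simp only [hcond]

-- B's table is exactly the list of A's cells
theorem pvScatter_eq_map (ous : List String) (l : Int) (ps : List Int) :
    pvScatter ous l ps (List.replicate l.toNat "-") =
      (List.range l.toNat).map (fun (k : Nat) => pvCell ous ps (k : Int)) := by
  apply List.ext_getElem
  · rw [pvScatter_length]; simp
  · intro i h1 h2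
    have hi : i < l.toNat := by simpa using h2
    rw [pvScatter_getElem ous l ps _ i (by simpa using hi)]
    simp only [List.getElem_map, List.getElem_range, List.getElem_replicate, pvCell]
    have hil : (i : Int) < l := by omega
    by_cases hm : (i : Int) ∈ ps <;> simp [hm, hil]

theorem pvFoldl_str_map {α : Type} (L : List α) (g : α → String) (init : String) :
    L.foldl (fun acc x => acc ++ g x) init = (L.map g).foldl (fun acc s => acc ++ s) init := by
  induction L generalizing init with
  | nil => rfl
  | cons x xs ih => simp only [List.foldl_cons, List.map_cons, ih]

-- ===== VERDICT (by name: the statement is the Claim_ definition above) =====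
theorem writeUncertainities_spec : Claim_equal_writeUncertainities := by
  intro ous l pos _ _
  unfold Spec_writeUncertainities writeUncertainities writeUncertainities_alt
  show _ = (pvScatter ous l pos (List.replicate l.toNat "-")).foldl (fun acc s => acc ++ (s ++ "\t\t\t")) ""
  rw [pvScatter_eq_map]
  rw [PySem.List.pyRange_one]
  simp only [Int.sub_zero, Int.zero_add]
  rw [pvFoldl_str_map _ (fun s => s ++ "\t\t\t"), List.map_map]
  rw [show (fun uncLine n => (uncLine ++ (if n ∈ pos then PySem.List.pyGetD ous n "" else "-")) ++ "\t\t\t")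
      = (fun (uncLine : String) (n : Int) => uncLine ++ (pvCell ous pos n ++ "\t\t\t")) from by
    funext uncLine n; simp [pvCell, String.append_assoc]]
  rw [pvFoldl_str_map _ (fun n => pvCell ous pos n ++ "\t\t\t")]
  simp only [List.map_map]
  rfl
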